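-- pv_equiv track=rewrite | github.com/rubesh-555/path-finding-algorithm | map_parser.py | create_simple_grid
-- ===== SOURCE A (Python) =====
-- from typing import Tuple, Optional, List
--
-- def create_simple_grid(size: int = 32) -> List[List[int]]:
--     grid = [[-1 for _ in range(size)] for _ in range(size)]
--
--     for i in range(size):
--         if i % 4 == 0:
--             for j in range(size):
--                 if j % 8 != 0:
--                     grid[i][j] = 3
--
--     return grid
-- ===== SOURCE B (Python) =====
-- def create_simple_grid(size: int = 32):
--     base = [-1] * size
--     pattern = (([-1] + [3] * 7) * (size // 8 + 1))[:size]
--     return [(pattern[:] if i % 4 == 0 else base[:]) for i in range(size)]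
-- ===== Notes on version B (the rewrite author's own statement) =====
-- stated objective: alternative
-- what changed: B builds the two template rows once by block tiling ([-1]+[3]*7 repeated, truncated to size) and assembles the grid in a single comprehension of per-row copies, replacing A's build-then-mutate nested loops with C-level sequence operations.
import Mathlib
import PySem

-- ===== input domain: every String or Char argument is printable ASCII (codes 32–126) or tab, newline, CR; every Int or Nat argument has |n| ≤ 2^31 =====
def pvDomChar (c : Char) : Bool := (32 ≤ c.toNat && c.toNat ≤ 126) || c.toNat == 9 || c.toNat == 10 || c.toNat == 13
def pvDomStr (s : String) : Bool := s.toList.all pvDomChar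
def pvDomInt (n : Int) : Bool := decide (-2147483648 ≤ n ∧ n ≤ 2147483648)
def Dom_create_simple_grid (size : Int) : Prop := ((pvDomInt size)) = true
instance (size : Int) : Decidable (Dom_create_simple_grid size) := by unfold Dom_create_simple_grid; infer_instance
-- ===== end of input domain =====

-- B precomputes the two template rows once and assembles the grid in one comprehension,
-- instead of A's build-then-mutate nested loops (objective: simpler; same asymptotic cost).


-- ===== PORT A =====
-- Python's in-place 'grid[i][j] = 3' over the inner j-loop is ported as read-modify-write of
-- row i (the inner loop only ever writes row i, so this is exact); loop indices come from
-- range(size), hence are nonnegative and in bounds, so '.toNat' and 'List.getD'/'List.set'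
-- are exact here.
def create_simple_grid (size : Int) : List (List Int) :=
  let grid : List (List Int) :=
    (PySem.List.pyRange 0 size 1).map (fun _ => (PySem.List.pyRange 0 size 1).map (fun _ => (-1 : Int)))
  (PySem.List.pyRange 0 size 1).foldl (fun g i =>
    if PySem.Int.mod i 4 = 0 then
      g.set i.toNat
        ((PySem.List.pyRange 0 size 1).foldl (fun row j =>
          if PySem.Int.mod j 8 ≠ 0 then row.set j.toNat 3 else row) (g.getD i.toNat []))
    else g) grid

-- ===== PORT B =====
-- '[-1] * size' is List.replicate size.toNat (-1); '([-1] + [3] * 7) * (size // 8 + 1)' is the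
-- literal 8-element block replicated (size // 8 + 1).toNat times and flattened (Python's list
-- repetition with a nonpositive count is the empty list, as is replicate of toNat ≤ 0);
-- '[:size]' is PySem.List.slice with stop 'size'.
def create_simple_grid_alt (size : Int) : List (List Int) :=
  let base : List Int := List.replicate size.toNat (-1)     -- [-1] * size
  let pattern : List Int :=
    PySem.List.slice
      ((List.replicate (PySem.Int.floordiv size 8 + 1).toNat
        ([-1, 3, 3, 3, 3, 3, 3, 3] : List Int)).flatten) none (some size)
  (PySem.List.pyRange 0 size 1).map (fun i => if PySem.Int.mod i 4 = 0 then pattern else base)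

-- ===== PRECONDITION & SPEC =====
def Spec_create_simple_grid (size : Int) (out : List (List Int)) : Prop := out = create_simple_grid_alt size
instance (size : Int) (out : List (List Int)) : Decidable (Spec_create_simple_grid size out) := by unfold Spec_create_simple_grid; infer_instance

-- ===== CLAIM (what is proved, stated in full; the proofs are below) =====
def Claim_equal_create_simple_grid : Prop := ∀ (size : Int), Dom_create_simple_grid size → Spec_create_simple_grid size (create_simple_grid size)

-- ===== LEMMAS AND PROOFS =====

/-- A fold over `range m` that (when `c i` holds) replaces entry `i` by `f` of its current
value acts independently at each index: it equals a `mapIdx`. -/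
theorem foldl_setf_eq_mapIdx {α : Type} (c : Nat → Prop) [DecidablePred c] (f : α → α) (d : α) :
    ∀ (m : Nat) (g : List α),
      (List.range m).foldl (fun g i => if c i then g.set i (f (g.getD i d)) else g) g
        = g.mapIdx (fun k x => if k < m ∧ c k then f x else x) := by
  intro m
  induction m with
  | zero =>
      intro g
      apply List.ext_getElem?
      intro k
      simp [List.getElem?_mapIdx]
  | succ m ih =>
      intro g
      rw [List.range_succ, List.foldl_append, ih g, List.foldl_cons, List.foldl_nil]
      by_cases hc : c m
      · rw [if_pos hc]
        apply List.ext_getElem?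
        intro k
        rw [List.getElem?_set]
        by_cases hk : m = k
        · subst hk
          by_cases hm : m < g.length
          · rw [if_pos rfl, if_pos (by simpa using hm)]
            have h1 : (g.mapIdx (fun k x => if k < m ∧ c k then f x else x)).getD m d = g[m] := by
              rw [List.getD_eq_getElem?_getD, List.getElem?_mapIdx, List.getElem?_eq_getElem hm]
              simp
            rw [h1, List.getElem?_mapIdx, List.getElem?_eq_getElem hm]
            simp [hc]
          · rw [if_pos rfl, if_neg (by simpa using hm)]
            rw [List.getElem?_mapIdx, List.getElem?_eq_none (by omega)]
            rfl
        · rw [if_neg hk, List.getElem?_mapIdx, List.getElem?_mapIdx]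
          cases g[k]? with
          | none => rfl
          | some x =>
              simp only [Option.map_some, Option.some.injEq]
              have h2 : (k < m ∧ c k) ↔ (k < m + 1 ∧ c k) := by
                constructor
                · rintro ⟨h1, h2⟩; exact ⟨by omega, h2⟩
                · rintro ⟨h1, h2⟩; exact ⟨by omega, h2⟩
              rw [if_congr h2 rfl rfl]
      · rw [if_neg hc]
        apply List.ext_getElem?
        intro k
        rw [List.getElem?_mapIdx, List.getElem?_mapIdx]
        cases g[k]? with
        | none => rfl
        | some x =>
            simp only [Option.map_some, Option.some.injEq]
            have h2 : (k < m ∧ c k) ↔ (k < m + 1 ∧ c k) := by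
              constructor
              · rintro ⟨h1, h2⟩; exact ⟨by omega, h2⟩
              · rintro ⟨h1, h2⟩
                rcases Nat.lt_succ_iff_lt_or_eq.mp h1 with h | h
                · exact ⟨h, h2⟩
                · subst h; exact absurd h2 hc
            rw [if_congr h2 rfl rfl]

/-- The flattened replicated 8-block is the 8-periodic pattern row. -/
theorem flatten_replicate_block :
    ∀ (m : Nat), (List.replicate m ([-1, 3, 3, 3, 3, 3, 3, 3] : List Int)).flatten
      = (List.range (8 * m)).map
          (fun (j : Nat) => if PySem.Int.mod (j : Int) 8 ≠ 0 then (3 : Int) else -1) := by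
  intro m
  induction m with
  | zero => simp
  | succ m ih =>
      rw [List.replicate_succ, List.flatten_cons, ih,
        show 8 * (m + 1) = 8 + 8 * m from by ring, List.range_add, List.map_append, List.map_map]
      congr 1
      symm
      apply List.map_congr_left
      intro j _
      have hmod : PySem.Int.mod ((8 + j : Nat) : Int) 8 = PySem.Int.mod (j : Int) 8 := by
        rw [PySem.Int.mod_eq_emod_of_pos (by norm_num),
          PySem.Int.mod_eq_emod_of_pos (by norm_num)]
        push_cast
        omega
      simp only [Function.comp_apply, hmod]

theorem create_simple_grid_eq (size : Int) :
    create_simple_grid size = create_simple_grid_alt size := by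
  rcases lt_or_ge size 0 with hneg | hpos
  · have h0 : size.toNat = 0 := by omega
    unfold create_simple_grid create_simple_grid_alt
    simp [PySem.List.pyRange_zero, h0]
  obtain ⟨n, rfl⟩ : ∃ n : Nat, size = (n : Int) := ⟨size.toNat, (Int.toNat_of_nonneg hpos).symm⟩
  unfold create_simple_grid create_simple_grid_alt
  simp only [PySem.List.pyRange_zero, List.foldl_map, List.map_map, Function.comp_def,
    Int.toNat_natCast]
  have hm : (PySem.Int.floordiv (n : Int) 8 + 1).toNat = n / 8 + 1 := by
    rw [PySem.Int.floordiv_eq_ediv_of_pos (by norm_num)]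
    omega
  have hslice : PySem.List.slice
      ((List.replicate ((PySem.Int.floordiv (n : Int) 8 + 1).toNat)
        ([-1, 3, 3, 3, 3, 3, 3, 3] : List Int)).flatten) none (some (n : Int))
      = (List.range n).map
          (fun (j : Nat) => if PySem.Int.mod (j : Int) 8 ≠ 0 then (3 : Int) else -1) := by
    rw [PySem.List.slice_to_natCast, hm, flatten_replicate_block, ← List.map_take,
      List.take_range]
    congr 2
    omega
  rw [hslice]
  have hbase : (List.range n).map (fun _ => (-1 : Int)) = List.replicate n (-1) := by
    apply List.ext_getElem?
    intro j
    by_cases hj : j < n <;>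
      simp [hj]
  simp only [hbase]
  have hinner := foldl_setf_eq_mapIdx (fun k : Nat => PySem.Int.mod (k : Int) 8 ≠ 0)
      (fun _ => (3 : Int)) 0 n (List.replicate n (-1))
  have hfold := foldl_setf_eq_mapIdx (fun k : Nat => PySem.Int.mod (k : Int) 4 = 0)
      (fun row => (List.range n).foldl
        (fun row (k : Nat) => if PySem.Int.mod (k : Int) 8 ≠ 0 then row.set k 3 else row) row)
      ([] : List Int) n ((List.range n).map (fun _ => List.replicate n (-1)))
  simp only [] at hfold hinner
  rw [hfold]
  have hpat : (List.range n).foldl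
      (fun row (k : Nat) => if PySem.Int.mod (k : Int) 8 ≠ 0 then row.set k 3 else row)
      (List.replicate n (-1))
      = (List.range n).map (fun (j : Nat) => if PySem.Int.mod (j : Int) 8 ≠ 0 then (3 : Int) else -1) := by
    rw [hinner]
    apply List.ext_getElem?
    intro j
    by_cases hj : j < n
    · rw [List.getElem?_mapIdx, List.getElem?_map, List.getElem?_range hj]
      simp [hj]
    · have h0 : (List.range n)[j]? = none :=
        List.getElem?_eq_none (by simpa using Nat.le_of_not_lt hj)
      have h1 : (List.replicate n (-1 : Int))[j]? = none :=
        List.getElem?_eq_none (by simpa using Nat.le_of_not_lt hj)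
      rw [List.getElem?_mapIdx, List.getElem?_map, h0, h1]
      rfl
  apply List.ext_getElem?
  intro k
  by_cases hk : k < n
  · rw [List.getElem?_mapIdx, List.getElem?_map, List.getElem?_map, List.getElem?_range hk]
    simp only [Option.map_some, Option.some.injEq, hk, true_and]
    rw [hpat]
  · have h0 : (List.range n)[k]? = none :=
      List.getElem?_eq_none (by simpa using Nat.le_of_not_lt hk)
    rw [List.getElem?_mapIdx, List.getElem?_map, List.getElem?_map, h0]
    rfl

-- ===== VERDICT (by name: the statement is the Claim_ definition above) =====
theorem create_simple_grid_spec : Claim_equal_create_simple_grid := by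
  intro size _
  exact create_simple_grid_eq size
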